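-- pv_equiv track=rewrite | github.com/iamseungpil/MemGenforARC | data/arc/env.py | _extract_harmony_final_channel
-- ===== SOURCE A (Python) =====
-- from typing import Optional, Dict, Tuple, List
--
-- def _extract_harmony_final_channel(text: str) -> Optional[str]:
--     """
--     Extract content from GPT-OSS Harmony format's final channel.
--
--     GPT-OSS outputs in format:
--         <|channel|>analysis<|message|>...analysis...<|channel|>final<|message|>
--         0 1 2
--         3 4 5
--         <|return|>
--
--     Returns the content after <|channel|>final<|message|> and before end markers.
--     """
--     # Look for final channel marker
--     final_marker = '<|channel|>final<|message|>'
--     idx = text.find(final_marker)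
--     if idx == -1:
--         return None
--
--     content = text[idx + len(final_marker):]
--
--     # Find end markers
--     end_markers = ['<|return|>', '<|end|>', '<|channel|>', '<|start|>']
--     min_end_idx = len(content)
--     for marker in end_markers:
--         end_idx = content.find(marker)
--         if end_idx != -1 and end_idx < min_end_idx:
--             min_end_idx = end_idx
--
--     return content[:min_end_idx].strip()
-- ===== SOURCE B (Python) =====
-- def _extract_harmony_final_channel(text):
--     # Single left-to-right scan for the earliest end marker, instead of a
--     # separate find() pass per marker followed by a min.
--     _, sep, content = text.partition('<|channel|>final<|message|>')
--     if not sep: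
--         return None
--     end_markers = ('<|return|>', '<|end|>', '<|channel|>', '<|start|>')
--     for i in range(len(content)):
--         if content.startswith(end_markers, i):
--             return content[:i].strip()
--     return content.strip()
-- ===== Notes on version B (the rewrite author's own statement) =====
-- stated objective: alternative
-- what changed: Replaced the four separate find() passes plus a min accumulator with str.partition and one left-to-right scan that stops at the first position where any end marker starts.
import Mathlib
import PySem

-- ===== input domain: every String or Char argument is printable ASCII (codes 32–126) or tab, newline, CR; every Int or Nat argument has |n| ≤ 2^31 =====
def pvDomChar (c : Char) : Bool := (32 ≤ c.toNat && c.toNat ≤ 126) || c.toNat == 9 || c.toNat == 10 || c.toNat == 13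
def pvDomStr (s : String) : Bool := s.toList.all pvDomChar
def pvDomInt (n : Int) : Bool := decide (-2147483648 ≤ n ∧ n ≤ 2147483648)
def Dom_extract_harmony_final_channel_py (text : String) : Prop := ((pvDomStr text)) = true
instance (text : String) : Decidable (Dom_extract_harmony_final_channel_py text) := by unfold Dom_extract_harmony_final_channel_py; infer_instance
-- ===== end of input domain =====

-- B replaces A's four find() passes + min accumulator by str.partition and one
-- left-to-right scan stopping at the first position where any end marker starts
-- (alternative decomposition, same asymptotic cost).

def pvFinalMarker : List Char := "<|channel|>final<|message|>".toList
def pvEndMarkers : List (List Char) := ["<|return|>".toList, "<|end|>".toList, "<|channel|>".toList, "<|start|>".toList]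

-- ===== PORT A =====
def extract_harmony_final_channel_py (text : String) : Option String :=
  let t := text.toList
  let idx := PySem.Chars.find t pvFinalMarker
  if idx = -1 then
    none
  else
    let content := PySem.Chars.slice t (some (idx + (pvFinalMarker.length : Int))) none
    let minEndIdx := pvEndMarkers.foldl
      (fun m marker =>
        let e := PySem.Chars.find content marker
        if e ≠ -1 ∧ e < m then e else m)
      (content.length : Int)
    some (String.ofList (PySem.Chars.strip (PySem.Chars.slice content none (some minEndIdx))))

-- ===== PORT B =====
-- text.partition(sub): B discards the head, tests the separator, keeps the tail.
def pvPartitionAfter (s sub : List Char) : Option (List Char) :=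
  let i := PySem.Chars.find s sub
  if i = -1 then none
  else some (PySem.Chars.slice s (some (i + (sub.length : Int))) none)

-- the 'for i in range(len(content)): if content.startswith(markers, i)' scan
def pvFirstHit (markers : List (List Char)) : List Char → Option Nat
  | [] => none
  | c :: rest =>
      if markers.any (fun m => PySem.Chars.startswith (c :: rest) m) then some 0
      else (pvFirstHit markers rest).map (· + 1)

def extract_harmony_final_channel_py_alt (text : String) : Option String :=
  match pvPartitionAfter text.toList pvFinalMarker with
  | none => none
  | some content =>
      match pvFirstHit pvEndMarkers content with
      | some i => some (String.ofList (PySem.Chars.strip (content.take i)))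
      | none => some (String.ofList (PySem.Chars.strip content))

-- ===== PRECONDITION & SPEC =====
def Spec_extract_harmony_final_channel_py (text : String) (out : Option String) : Prop := out = extract_harmony_final_channel_py_alt text
instance (text : String) (out : Option String) : Decidable (Spec_extract_harmony_final_channel_py text out) := by unfold Spec_extract_harmony_final_channel_py; infer_instance

-- ===== CLAIM (what is proved, stated in full; the proofs are below) =====
def Claim_equal_extract_harmony_final_channel_py : Prop := ∀ (text : String), Dom_extract_harmony_final_channel_py text → Spec_extract_harmony_final_channel_py text (extract_harmony_final_channel_py text)

-- ===== LEMMAS AND PROOFS =====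

-- A's min-over-finds fold: characterisation (stated on the let-free form of the fold body)
theorem pv_fold_spec (content : List Char) (markers : List (List Char)) (a : Int) :
    (markers.foldl (fun m marker =>
        if PySem.Chars.find content marker ≠ -1 ∧ PySem.Chars.find content marker < m then
          PySem.Chars.find content marker else m) a = a ∨
      ∃ m ∈ markers, markers.foldl (fun m marker =>
        if PySem.Chars.find content marker ≠ -1 ∧ PySem.Chars.find content marker < m then
          PySem.Chars.find content marker else m) a = PySem.Chars.find content m ∧
        PySem.Chars.find content m ≠ -1) ∧
    markers.foldl (fun m marker =>
        if PySem.Chars.find content marker ≠ -1 ∧ PySem.Chars.find content marker < m then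
          PySem.Chars.find content marker else m) a ≤ a ∧
    (∀ m ∈ markers, PySem.Chars.find content m ≠ -1 →
      markers.foldl (fun m marker =>
        if PySem.Chars.find content marker ≠ -1 ∧ PySem.Chars.find content marker < m then
          PySem.Chars.find content marker else m) a ≤ PySem.Chars.find content m) := by
  induction markers generalizing a with
  | nil => simp
  | cons m0 tl ih =>
    simp only [List.foldl_cons, List.mem_cons]
    by_cases hc : PySem.Chars.find content m0 ≠ -1 ∧ PySem.Chars.find content m0 < a
    · rw [if_pos hc]
      obtain ⟨h1, h2, h3⟩ := ih (PySem.Chars.find content m0)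
      refine ⟨?_, by omega, ?_⟩
      · rcases h1 with h | ⟨m, hm, hh⟩
        · exact Or.inr ⟨m0, Or.inl rfl, h, hc.1⟩
        · exact Or.inr ⟨m, Or.inr hm, hh⟩
      · rintro m (rfl | hm) hne
        · exact h2
        · exact h3 m hm hne
    · rw [if_neg hc]
      obtain ⟨h1, h2, h3⟩ := ih a
      refine ⟨?_, h2, ?_⟩
      · rcases h1 with h | ⟨m, hm, hh⟩
        · exact Or.inl h
        · exact Or.inr ⟨m, Or.inr hm, hh⟩
      · rintro m (rfl | hm) hne
        · have : a ≤ PySem.Chars.find content m := by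
            by_contra hlt
            exact hc ⟨hne, by omega⟩
          omega
        · exact h3 m hm hne

theorem pv_hit_some (markers : List (List Char)) (s : List Char) (i : Nat)
    (h : pvFirstHit markers s = some i) :
    i < s.length ∧ (∃ m ∈ markers, m <+: s.drop i) ∧
      ∀ j < i, ¬ ∃ m ∈ markers, m <+: s.drop j := by
  induction s generalizing i with
  | nil => simp [pvFirstHit] at h
  | cons c rest ih =>
    rw [pvFirstHit] at h
    by_cases hany : markers.any (fun m => PySem.Chars.startswith (c :: rest) m) = true
    · rw [if_pos hany, Option.some.injEq] at h
      subst h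
      obtain ⟨m, hm, hsw⟩ := List.any_eq_true.mp hany
      exact ⟨by simp, ⟨m, hm, by simpa using (PySem.Chars.startswith_iff _ _).mp hsw⟩,
        by omega⟩
    · rw [if_neg hany] at h
      obtain ⟨i', hi', rfl⟩ := Option.map_eq_some_iff.mp h
      obtain ⟨hlen, hex, hmin⟩ := ih i' hi'
      refine ⟨by simpa using Nat.succ_lt_succ hlen, by simpa using hex, ?_⟩
      intro j hj
      match j with
      | 0 =>
        rintro ⟨m, hm, hp⟩
        exact (List.any_eq_false.mp (Bool.eq_false_iff.mpr hany) m hm)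
          ((PySem.Chars.startswith_iff _ _).mpr (by simpa using hp))
      | j' + 1 =>
        simpa using hmin j' (by omega)

theorem pv_hit_none (markers : List (List Char)) (s : List Char)
    (h : pvFirstHit markers s = none) :
    ∀ j < s.length, ¬ ∃ m ∈ markers, m <+: s.drop j := by
  induction s with
  | nil => simp
  | cons c rest ih =>
    rw [pvFirstHit] at h
    by_cases hany : markers.any (fun m => PySem.Chars.startswith (c :: rest) m) = true
    · rw [if_pos hany] at h; exact absurd h (by simp)
    · rw [if_neg hany, Option.map_eq_none_iff] at h
      intro j hj
      match j with
      | 0 =>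
        rintro ⟨m, hm, hp⟩
        exact (List.any_eq_false.mp (Bool.eq_false_iff.mpr hany) m hm)
          ((PySem.Chars.startswith_iff _ _).mpr (by simpa using hp))
      | j' + 1 =>
        simpa using ih h j' (by simpa using hj)

-- the heart: A's sliced-by-min-fold content equals B's scan result
theorem pv_key (content : List Char) :
    PySem.Chars.slice content none (some (pvEndMarkers.foldl
      (fun m marker =>
        let e := PySem.Chars.find content marker
        if e ≠ -1 ∧ e < m then e else m) (content.length : Int)))
    = (match pvFirstHit pvEndMarkers content with
       | some i => content.take i
       | none => content) := by
  have hzeta : pvEndMarkers.foldl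
      (fun m marker =>
        let e := PySem.Chars.find content marker
        if e ≠ -1 ∧ e < m then e else m) (content.length : Int)
      = pvEndMarkers.foldl (fun m marker =>
        if PySem.Chars.find content marker ≠ -1 ∧ PySem.Chars.find content marker < m then
          PySem.Chars.find content marker else m) (content.length : Int) := rfl
  rw [hzeta]
  obtain ⟨h1, h2, h3⟩ := pv_fold_spec content pvEndMarkers (content.length : Int)
  set R := pvEndMarkers.foldl (fun m marker =>
        if PySem.Chars.find content marker ≠ -1 ∧ PySem.Chars.find content marker < m then
          PySem.Chars.find content marker else m) (content.length : Int) with hR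
  have hne : ∀ m ∈ pvEndMarkers, m ≠ [] := by decide
  cases hh : pvFirstHit pvEndMarkers content with
  | none =>
    have hnone := pv_hit_none pvEndMarkers content hh
    have hall : ∀ m ∈ pvEndMarkers, PySem.Chars.find content m = -1 := by
      intro m hm
      rw [PySem.Chars.find_eq_neg_one_iff]
      intro hinf
      have := (PySem.Chars.exists_prefix_drop_iff_isIn m content).mpr
        ((PySem.Chars.isIn_iff_infix m content).mpr hinf)
      obtain ⟨j, hp⟩ := this
      have hjlen : j < content.length := by
        by_contra hge
        rw [List.drop_eq_nil_of_le (by omega)] at hp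
        exact hne m hm (List.prefix_nil.mp hp)
      exact hnone j hjlen ⟨m, hm, hp⟩
    have hRlen : R = (content.length : Int) := by
      rcases h1 with h | ⟨m, hm, _, hfind⟩
      · exact h
      · exact absurd (hall m hm) hfind
    rw [hRlen]
    simp [PySem.Chars.slice_eq_listSlice, PySem.List.slice_to_natCast]
  | some i =>
    obtain ⟨hlen, ⟨m, hm, hp⟩, hmin⟩ := pv_hit_some pvEndMarkers content i hh
    have hinf : m <:+: content := hp.isInfix.trans (content.drop_suffix i).isInfix
    have hfne : PySem.Chars.find content m ≠ -1 :=
      (PySem.Chars.find_ne_neg_one_iff content m).mpr hinf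
    have hfnn : 0 ≤ PySem.Chars.find content m := by
      have := PySem.Chars.neg_one_le_find content m; omega
    have hfle : PySem.Chars.find content m ≤ (i : Int) := by
      obtain ⟨_, hmn⟩ := PySem.Chars.find_spec hfnn
      by_contra hgt
      exact hmn i (by omega) hp
    have hRle : R ≤ (i : Int) := le_trans (h3 m hm hfne) hfle
    have hRi : R = (i : Int) := by
      rcases h1 with h | ⟨m', hm', hRf, hf'ne⟩
      · omega
      · have hf'nn : 0 ≤ PySem.Chars.find content m' := by
          have := PySem.Chars.neg_one_le_find content m'; omega
        obtain ⟨hp', _⟩ := PySem.Chars.find_spec hf'nn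
        have : ¬ (PySem.Chars.find content m').toNat < i := by
          intro hlt
          exact hmin _ hlt ⟨m', hm', hp'⟩
        omega
    rw [hRi]
    simp [PySem.Chars.slice_eq_listSlice, PySem.List.slice_to_natCast]

-- ===== VERDICT (by name: the statement is the Claim_ definition above) =====
theorem extract_harmony_final_channel_py_spec : Claim_equal_extract_harmony_final_channel_py := by
  intro text _
  unfold Spec_extract_harmony_final_channel_py
  unfold extract_harmony_final_channel_py extract_harmony_final_channel_py_alt pvPartitionAfter
  by_cases h : PySem.Chars.find text.toList pvFinalMarker = -1
  · simp [h]
  · simp only [h, if_false]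
    rw [pv_key]
    cases pvFirstHit pvEndMarkers
        (PySem.Chars.slice text.toList
          (some (PySem.Chars.find text.toList pvFinalMarker + (pvFinalMarker.length : Int))) none) <;>
      simp
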